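-- pv_equiv track=rewrite | github.com/SilenZcience/cat_win | cat_win/src/service/visualizer.py | get_hilbert_curve
-- ===== SOURCE A (Python) =====
-- def get_fit_terminal_square(length: int, width: int) -> int:
--     """
--     calculate the best fitting square size.
--
--     Parameters:
--     length (int):
--         the length of the data stream
--     width (int):
--         the max width displayable on the console window
--
--     Returns:
--         largest fitting power of two
--     """
--     w = 1
--     # find the largest power of two that fits in the (console window) width
--     # and when squared does not exceed the (data stream) length
--     while (w*w*4) <= length and w*2 <= width: # w*w*4 = (w*2)**2
--         w *= 2
--     return w
--
-- def get_hilbert_index(n: int, y: int, x: int) -> int: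
--     """
--     calculate the hilbert curve index.
--
--     Parameters:
--     n (int):
--         the order of the hilbert curve
--     y (int):
--         the row
--     x (int):
--         the column
--
--     Returns:
--     d (int):
--         the hilbert curve index
--     """
--     d = 0
--     s = n // 2
--     while s > 0:
--         rx = (x & s) > 0
--         ry = (y & s) > 0
--         d += s * s * ((3 * rx) ^ ry)
--         if ry == 0:
--             if rx == 1:
--                 x = n - 1 - x
--                 y = n - 1 - y
--             x, y = y, x
--         s = s // 2
--     return d
--
-- def get_hilbert_curve(_list, width: int):
--     """
--     break the given list into chunks of a given size.
--
--     Parameters: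
--     _list (iterable):
--         the list or bytearray to put in pattern
--     width (int):
--         the max displayable width
--
--     Yields:
--     _list_chunk
--         the next chunk to display
--     """
--     _length = len(_list)
--     width = get_fit_terminal_square(_length, width)
--
--     i, n = 0, width**2
--     while i*n <= _length:
--         _list_chunk = _list[i*n:(i+1)*n]
--         for y in range(width):
--             row = []
--             for x in range(width):
--                 try:
--                     row.append(_list_chunk[get_hilbert_index(width, y, x)])
--                 except IndexError:
--                     row.append(-1)
--             if row[0] < 0:
--                 break
--             yield row
--         i += 1
-- ===== SOURCE B (Python) =====
-- def get_fit_terminal_square(length: int, width: int) -> int: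
--     w = 1
--     while (w*w*4) <= length and w*2 <= width:
--         w *= 2
--     return w
--
-- def _d2xy(n: int, d: int):
--     """recursive inverse of get_hilbert_index's xy2d (same rotation convention)"""
--     if n <= 1:
--         return 0, 0
--     s = n // 2
--     q, r = d // (s*s), d % (s*s)
--     x, y = _d2xy(s, r)
--     if q == 0:
--         return y, x
--     if q == 1:
--         return x, y + s
--     if q == 2:
--         return x + s, y + s
--     return s + s - 1 - y, s - 1 - x
--
-- def get_hilbert_curve(_list, width: int):
--     _length = len(_list)
--     width = get_fit_terminal_square(_length, width)
--     n = width * width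
--     # coordinates of the curve in index order, computed once for all chunks
--     coords = [_d2xy(width, d) for d in range(n)]
--     i = 0
--     while i*n <= _length:
--         _list_chunk = _list[i*n:(i+1)*n]
--         grid = [[-1] * width for _ in range(width)]
--         for d, v in enumerate(_list_chunk):
--             x, y = coords[d]
--             grid[y][x] = v
--         for row in grid:
--             if row[0] < 0:
--                 break
--             yield row
--         i += 1
-- ===== Notes on version B (the rewrite author's own statement) =====
-- stated objective: alternative
-- what changed: Instead of computing the Hilbert index with a per-cell bit-twiddling loop for every cell of every chunk, B computes the inverse-Hilbert coordinate table once (a recursive d2xy that inverts A's xy2d) and scatters each chunk's elements into a width x width grid in curve order, then emits rows with the same row[0]<0 break.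
import Mathlib
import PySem

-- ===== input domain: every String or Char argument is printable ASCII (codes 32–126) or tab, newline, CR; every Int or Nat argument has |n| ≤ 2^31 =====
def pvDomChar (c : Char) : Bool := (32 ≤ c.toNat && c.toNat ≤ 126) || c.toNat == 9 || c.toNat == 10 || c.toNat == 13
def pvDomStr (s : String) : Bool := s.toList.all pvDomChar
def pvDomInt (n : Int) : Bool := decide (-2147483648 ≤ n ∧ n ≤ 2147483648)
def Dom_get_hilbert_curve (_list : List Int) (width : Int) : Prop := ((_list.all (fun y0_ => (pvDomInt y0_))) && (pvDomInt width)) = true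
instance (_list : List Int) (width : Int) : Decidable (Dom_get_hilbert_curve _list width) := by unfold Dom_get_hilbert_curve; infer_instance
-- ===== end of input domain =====

-- B replaces A's per-cell hilbert-index bit loop by one inverse-hilbert coordinate table,
-- computed once, and scatters each chunk into a grid in curve order (alternative algorithm,
-- same return value).

-- ===== PORT A =====
-- shared helper: the while loop of get_fit_terminal_square (identical in Source A and Source B).
-- The fuel argument only makes the recursion structural; length.toNat + 1 always suffices,
-- since w doubles from 1 and the loop needs w*w*4 ≤ length to continue.
def fitLoop (length width : Int) : Nat → Int → Int
  | 0, w => w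
  | fuel+1, w =>
    if w * w * 4 ≤ length ∧ w * 2 ≤ width then fitLoop length width fuel (w * 2)
    else w

def get_fit_terminal_square (length width : Int) : Int :=
  fitLoop length width (length.toNat + 1) 1

-- the while loop of get_hilbert_index (state s, x, y, d); fuel n.toNat + 1 always
-- suffices (s starts at n // 2 and halves to 0)
def hilbLoopA (n : Int) : Nat → Int → Int → Int → Int → Int
  | 0, _, _, _, d => d
  | fuel+1, s, x, y, d =>
    if 0 < s then
      let rx : Int := if 0 < PySem.Int.band x s then 1 else 0
      let ry : Int := if 0 < PySem.Int.band y s then 1 else 0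
      let d' := d + s * s * PySem.Int.bxor (3 * rx) ry
      let xy : Int × Int :=
        if ry = 0 then
          (if rx = 1 then (n - 1 - y, n - 1 - x) else (y, x))
        else (x, y)
      hilbLoopA n fuel (PySem.Int.floordiv s 2) xy.1 xy.2 d'
    else d

def get_hilbert_index (n y x : Int) : Int :=
  hilbLoopA n (n.toNat + 1) (PySem.Int.floordiv n 2) x y 0

-- inner 'for x in range(width)' loop building one row (try chunk[idx] / except IndexError → -1)
def rowA (width : Int) (chunk : List Int) (y : Int) : List Int :=
  (PySem.List.pyRange 0 width 1).foldl
    (fun row x => row ++ [(PySem.List.pyGet? chunk (get_hilbert_index width y x)).getD (-1)]) []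

-- 'for y in range(width)' loop with the break on row[0] < 0
-- (width ≥ 1 at every call, so row is nonempty and the .getD default of row[0] is never used)
def rowsA (width : Int) (chunk : List Int) : List Int → List (List Int)
  | [] => []
  | y :: ys =>
    let row := rowA width chunk y
    if (PySem.List.pyGet? row 0).getD 0 < 0 then []
    else row :: rowsA width chunk ys

-- outer 'while i*n <= _length' loop; fuel _list.length + 2 always suffices
-- (n = width² ≥ 1, so i grows past _length // n within that many iterations)
def outerA (_list : List Int) (width n : Int) : Nat → Int → List (List Int)
  | 0, _ => []
  | fuel+1, i =>
    if i * n ≤ (_list.length : Int) then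
      let chunk := PySem.List.slice _list (some (i * n)) (some ((i + 1) * n))
      rowsA width chunk (PySem.List.pyRange 0 width 1) ++ outerA _list width n fuel (i + 1)
    else []

def get_hilbert_curve (_list : List Int) (width : Int) : List (List Int) :=
  let _length : Int := (_list.length : Int)
  let w := get_fit_terminal_square _length width
  outerA _list w (w ^ 2) (_list.length + 2) 0

-- ===== PORT B =====
-- recursive inverse _d2xy of Source B; fuel n.toNat + 1 always suffices (n halves each call)
def d2xyB : Nat → Int → Int → Int × Int
  | 0, _, _ => (0, 0)
  | fuel+1, n, d =>
    if n ≤ 1 then (0, 0)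
    else
      let s := PySem.Int.floordiv n 2
      let q := PySem.Int.floordiv d (s * s)
      let r := PySem.Int.mod d (s * s)
      let p := d2xyB fuel s r
      if q = 0 then (p.2, p.1)
      else if q = 1 then (p.1, p.2 + s)
      else if q = 2 then (p.1 + s, p.2 + s)
      else (s + s - 1 - p.2, s - 1 - p.1)

-- 'for d, v in enumerate(_list_chunk): x, y = coords[d]; grid[y][x] = v'
-- (d < len(coords) and 0 ≤ x, y < width at every write, so the .getD defaults and
--  .toNat conversions are exact: Python's grid[y][x] = v with in-range nonnegative indices)
def scatterB (coords : List (Int × Int)) (chunk : List Int) (grid : List (List Int)) : List (List Int) :=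
  (PySem.List.enumerate chunk 0).foldl
    (fun g dv =>
      let xy := (PySem.List.pyGet? coords dv.1).getD (0, 0)
      g.set xy.2.toNat ((g.getD xy.2.toNat []).set xy.1.toNat dv.2)) grid

-- 'for row in grid: if row[0] < 0: break; yield row'
def emitB : List (List Int) → List (List Int)
  | [] => []
  | row :: rest => if (PySem.List.pyGet? row 0).getD 0 < 0 then [] else row :: emitB rest

-- outer 'while i*n <= _length' loop of Source B ('grid = [[-1] * width for _ in range(width)]');
-- fuel _list.length + 2 always suffices, as in outerA
def outerB (_list : List Int) (width n : Int) (coords : List (Int × Int)) :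
    Nat → Int → List (List Int)
  | 0, _ => []
  | fuel+1, i =>
    if i * n ≤ (_list.length : Int) then
      let chunk := PySem.List.slice _list (some (i * n)) (some ((i + 1) * n))
      let grid := (PySem.List.pyRange 0 width 1).map (fun _ => List.replicate width.toNat (-1))
      emitB (scatterB coords chunk grid) ++ outerB _list width n coords fuel (i + 1)
    else []

def get_hilbert_curve_alt (_list : List Int) (width : Int) : List (List Int) :=
  let _length : Int := (_list.length : Int)
  let w := get_fit_terminal_square _length width
  let n := w * w
  let coords := (PySem.List.pyRange 0 n 1).map (fun d => d2xyB (w.toNat + 1) w d)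
  outerB _list w n coords (_list.length + 2) 0

-- ===== PRECONDITION & SPEC =====
def Spec_get_hilbert_curve (_list : List Int) (width : Int) (out : List (List Int)) : Prop := out = get_hilbert_curve_alt _list width
instance (_list : List Int) (width : Int) (out : List (List Int)) : Decidable (Spec_get_hilbert_curve _list width out) := by unfold Spec_get_hilbert_curve; infer_instance

-- ===== CLAIM (what is proved, stated in full; the proofs are below) =====
def Claim_equal_get_hilbert_curve : Prop := ∀ (_list : List Int) (width : Int), Dom_get_hilbert_curve _list width → Spec_get_hilbert_curve _list width (get_hilbert_curve _list width)

-- ===== LEMMAS AND PROOFS =====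
def hN : Nat → Int → Int → Int
  | 0, _, _ => 0
  | k+1, y, x =>
    let s : Int := 2 ^ k
    if s ≤ y then
      (if s ≤ x then s * s * 2 + hN k (y - s) (x - s) else s * s * 1 + hN k (y - s) x)
    else
      (if s ≤ x then s * s * 3 + hN k (s - 1 - (x - s)) (s - 1 - y) else hN k x y)

theorem two_pow_cast (k : Nat) : ((2:Int) ^ k) = ((2 ^ k : Nat) : Int) := by push_cast; ring

theorem hN_bound (k : Nat) : ∀ (y x : Int), 0 ≤ y → y < 2 ^ k → 0 ≤ x → x < 2 ^ k →
    0 ≤ hN k y x ∧ hN k y x < 2 ^ k * 2 ^ k := by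
  induction k with
  | zero => intro y x h1 h2 h3 h4; simp [hN]
  | succ k ih =>
    intro y x h1 h2 h3 h4
    have hs : (0:Int) < 2 ^ k := by positivity
    have hp : ((2:Int) ^ (k+1)) = 2 ^ k * 2 := by rw [pow_succ]
    simp only [hN]
    split_ifs with hy hx hx
    · have := ih (y - 2^k) (x - 2^k) (by omega) (by omega) (by omega) (by omega)
      constructor <;> nlinarith
    · have := ih (y - 2^k) x (by omega) (by omega) (by omega) (by omega)
      constructor <;> nlinarith
    · have := ih (2^k - 1 - (x - 2^k)) (2^k - 1 - y) (by omega) (by omega) (by omega) (by omega)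
      constructor <;> nlinarith
    · have := ih x y (by omega) (by omega) (by omega) (by omega)
      constructor <;> nlinarith

theorem emod_eq_of (a b H : Int) (h0 : 0 < H) (hb0 : 0 ≤ b) (hbH : b < H)
    (hdvd : H ∣ (a - b)) : a % H = b := by
  have h1 : a % H = b % H := Int.emod_eq_emod_iff_emod_sub_eq_zero.mpr (Int.emod_eq_zero_of_dvd hdvd)
  rw [h1, Int.emod_eq_of_lt hb0 hbH]

theorem nat_band_pos_iff (m j : Nat) : (0 < m &&& 2 ^ j) ↔ 2 ^ j ≤ m % 2 ^ (j+1) := by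
  have hpow : 0 < 2 ^ j := Nat.pow_pos (by norm_num)
  have h2 : m &&& 2 ^ j = (m.testBit j).toNat * 2 ^ j := Nat.and_two_pow _ _
  have h3 : m.testBit j = decide (m / 2 ^ j % 2 = 1) := Nat.testBit_eq_decide_div_mod_eq
  have h4 : m % 2 ^ (j+1) / 2 ^ j = m / 2 ^ j % 2 := by
    rw [pow_succ]; exact Nat.mod_mul_right_div_self _ _ _
  have hlt : m % 2 ^ (j+1) < 2 ^ j * 2 := by
    have := Nat.mod_lt m (y := 2 ^ (j+1)) (Nat.pow_pos (by norm_num))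
    rw [pow_succ] at this; omega
  rw [h2, h3]
  rcases Nat.lt_or_ge (m % 2 ^ (j+1)) (2 ^ j) with hcase | hcase
  · have h5 : m / 2 ^ j % 2 = 0 := by rw [← h4]; exact Nat.div_eq_of_lt hcase
    simp [h5]; omega
  · have h5 : m / 2 ^ j % 2 = 1 := by
      rw [← h4]
      have l1 : 1 ≤ m % 2 ^ (j+1) / 2 ^ j := (Nat.one_le_div_iff hpow).mpr hcase
      have l2 : m % 2 ^ (j+1) / 2 ^ j < 2 := (Nat.div_lt_iff_lt_mul hpow).mpr (by omega)
      omega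
    simp [h5]; omega

theorem band_pos_iff (x : Int) (j : Nat) (hx : 0 ≤ x) :
    (0 < PySem.Int.band x ((2:Int) ^ j)) ↔ (2:Int) ^ j ≤ x % 2 ^ (j+1) := by
  have hc : ((2:Int) ^ j) = ((2 ^ j : Nat) : Int) := by push_cast; ring
  have hc1 : ((2:Int) ^ (j+1)) = ((2 ^ (j+1) : Nat) : Int) := by push_cast; ring
  have hx' : x = (x.toNat : Int) := (Int.toNat_of_nonneg hx).symm
  rw [hx', hc, hc1, PySem.Int.band_natCast, ← Int.natCast_emod]
  rw [Int.natCast_pos, Nat.cast_le]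
  exact nat_band_pos_iff _ _

theorem fd_pow (k : Nat) : PySem.Int.floordiv ((2:Int) ^ (k+1)) 2 = 2 ^ k := by
  rw [PySem.Int.floordiv_eq_ediv_of_pos (by norm_num), pow_succ]
  exact Int.mul_ediv_cancel _ (by norm_num)

theorem d2xy_inv (k : Nat) : ∀ (fuel : Nat), k + 1 ≤ fuel → ∀ (d : Int), 0 ≤ d → d < 2 ^ k * 2 ^ k →
    0 ≤ (d2xyB fuel (2 ^ k) d).1 ∧ (d2xyB fuel (2 ^ k) d).1 < 2 ^ k ∧
    0 ≤ (d2xyB fuel (2 ^ k) d).2 ∧ (d2xyB fuel (2 ^ k) d).2 < 2 ^ k ∧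
    hN k (d2xyB fuel (2 ^ k) d).2 (d2xyB fuel (2 ^ k) d).1 = d := by
  induction k with
  | zero =>
    intro fuel hf d h0 h1
    obtain ⟨f, rfl⟩ : ∃ f, fuel = f + 1 := ⟨fuel - 1, by omega⟩
    have : d = 0 := by norm_num at h1; omega
    subst this
    simp [d2xyB, hN]
  | succ k ih =>
    intro fuel hf d h0 h1
    obtain ⟨f, rfl⟩ : ∃ f, fuel = f + 1 := ⟨fuel - 1, by omega⟩
    have hs : (0:Int) < 2 ^ k := by positivity
    have hm : (0:Int) < 2 ^ k * 2 ^ k := by positivity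
    have hn1 : ¬ ((2:Int) ^ (k+1) ≤ 1) := by
      have : (2:Int) ≤ 2 ^ (k+1) := by
        calc (2:Int) = 2 ^ 1 := by norm_num
        _ ≤ 2 ^ (k+1) := by apply pow_le_pow_right₀ <;> omega
      omega
    rw [d2xyB]
    simp only [hn1, dif_neg, not_false_iff, fd_pow]
    set m : Int := 2 ^ k * 2 ^ k with hmdef
    have hdm : PySem.Int.floordiv d m * m + PySem.Int.mod d m = d := PySem.Int.floordiv_mul_add_mod d m
    have hr0 : 0 ≤ PySem.Int.mod d m := by
      rw [PySem.Int.mod_eq_emod_of_pos hm]; exact Int.emod_nonneg d (by omega)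
    have hr1 : PySem.Int.mod d m < m := by
      rw [PySem.Int.mod_eq_emod_of_pos hm]; exact Int.emod_lt_of_pos d hm
    set q : Int := PySem.Int.floordiv d m with hqdef
    set r : Int := PySem.Int.mod d m with hrdef
    have hsucc : ((2:Int) ^ (k+1)) = 2 ^ k + 2 ^ k := by rw [pow_succ]; ring
    have h4 : d < 4 * m := by rw [hsucc] at h1; nlinarith
    have hq0 : 0 ≤ q := by nlinarith
    have hq4 : q < 4 := by nlinarith
    have hq : q = 0 ∨ q = 1 ∨ q = 2 ∨ q = 3 := by omega
    obtain ⟨hx0, hx1, hy0, hy1, hval⟩ := ih f (by omega) r hr0 hr1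
    set p := d2xyB f (2 ^ k) r with hpdef
    rcases hq with h | h | h | h <;> rw [h] at hdm ⊢ <;> norm_num
    · -- q = 0 : result (p.2, p.1)
      refine ⟨by omega, by omega, by omega, by omega, ?_⟩
      simp only [hN]
      rw [if_neg (by omega), if_neg (by omega)]
      omega
    · refine ⟨by omega, by omega, by omega, by omega, ?_⟩
      simp only [hN]
      rw [if_pos (by omega), if_neg (by omega)]
      rw [show p.2 + 2 ^ k - 2 ^ k = p.2 by ring]
      omega
    · refine ⟨by omega, by omega, by omega, by omega, ?_⟩
      simp only [hN]
      rw [if_pos (by omega), if_pos (by omega)]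
      rw [show p.2 + 2 ^ k - 2 ^ k = p.2 by ring, show p.1 + 2 ^ k - 2 ^ k = p.1 by ring]
      omega
    · refine ⟨by omega, by omega, by omega, by omega, ?_⟩
      simp only [hN]
      rw [if_neg (by omega), if_pos (by omega)]
      rw [show (2:Int) ^ k - 1 - (2 ^ k + 2 ^ k - 1 - p.2 - 2 ^ k) = p.2 by ring,
          show (2:Int) ^ k - 1 - (2 ^ k - 1 - p.1) = p.1 by ring]
      omega

theorem hN_inv (k : Nat) : ∀ (fuel : Nat), k + 1 ≤ fuel → ∀ (y x : Int), 0 ≤ y → y < 2 ^ k → 0 ≤ x → x < 2 ^ k →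
    d2xyB fuel (2 ^ k) (hN k y x) = (x, y) := by
  induction k with
  | zero =>
    intro fuel hf y x h1 h2 h3 h4
    obtain ⟨f, rfl⟩ : ∃ f, fuel = f + 1 := ⟨fuel - 1, by omega⟩
    have hy : y = 0 := by norm_num at h2 ⊢; omega
    have hx : x = 0 := by norm_num at h4 ⊢; omega
    subst hy; subst hx
    simp [d2xyB, hN]
  | succ k ih =>
    intro fuel hf y x hy0 hy1 hx0 hx1
    obtain ⟨f, rfl⟩ : ∃ f, fuel = f + 1 := ⟨fuel - 1, by omega⟩
    have hs : (0:Int) < 2 ^ k := by positivity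
    have hm : (0:Int) < 2 ^ k * 2 ^ k := by positivity
    have hn1 : ¬ ((2:Int) ^ (k+1) ≤ 1) := by
      have : (2:Int) ≤ 2 ^ (k+1) := by
        calc (2:Int) = 2 ^ 1 := by norm_num
        _ ≤ 2 ^ (k+1) := by apply pow_le_pow_right₀ <;> omega
      omega
    have hsucc : ((2:Int) ^ (k+1)) = 2 ^ k + 2 ^ k := by rw [pow_succ]; ring
    simp only [hN]
    split_ifs with hy hx hx
    · -- q = 2
      have hb := hN_bound k (y - 2^k) (x - 2^k) (by omega) (by omega) (by omega) (by omega)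
      rw [d2xyB]
      simp only [hn1, dif_neg, not_false_iff, fd_pow]
      have hq : PySem.Int.floordiv (2^k*2^k*2 + hN k (y - 2^k) (x - 2^k)) (2^k*2^k) = 2 :=
        (PySem.Int.floordiv_eq_iff_of_pos hm).mpr ⟨by nlinarith, by nlinarith⟩
      have hr : PySem.Int.mod (2^k*2^k*2 + hN k (y - 2^k) (x - 2^k)) (2^k*2^k)
          = hN k (y - 2^k) (x - 2^k) := by
        have h5 := PySem.Int.floordiv_mul_add_mod (2^k*2^k*2 + hN k (y - 2^k) (x - 2^k)) (2^k*2^k)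
        rw [hq] at h5; omega
      rw [hq, hr, ih f (by omega) (y - 2^k) (x - 2^k) (by omega) (by omega) (by omega) (by omega)]
      norm_num
    · -- q = 1
      have hb := hN_bound k (y - 2^k) x (by omega) (by omega) (by omega) (by omega)
      rw [d2xyB]
      simp only [hn1, dif_neg, not_false_iff, fd_pow]
      have hq : PySem.Int.floordiv (2^k*2^k*1 + hN k (y - 2^k) x) (2^k*2^k) = 1 :=
        (PySem.Int.floordiv_eq_iff_of_pos hm).mpr ⟨by nlinarith, by nlinarith⟩
      have hr : PySem.Int.mod (2^k*2^k*1 + hN k (y - 2^k) x) (2^k*2^k) = hN k (y - 2^k) x := by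
        have h5 := PySem.Int.floordiv_mul_add_mod (2^k*2^k*1 + hN k (y - 2^k) x) (2^k*2^k)
        rw [hq] at h5; omega
      rw [hq, hr, ih f (by omega) (y - 2^k) x (by omega) (by omega) (by omega) (by omega)]
      norm_num
    · -- q = 3
      have hb := hN_bound k (2^k - 1 - (x - 2^k)) (2^k - 1 - y) (by omega) (by omega) (by omega) (by omega)
      rw [d2xyB]
      simp only [hn1, dif_neg, not_false_iff, fd_pow]
      have hq : PySem.Int.floordiv (2^k*2^k*3 + hN k (2^k - 1 - (x - 2^k)) (2^k - 1 - y)) (2^k*2^k) = 3 :=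
        (PySem.Int.floordiv_eq_iff_of_pos hm).mpr ⟨by nlinarith, by nlinarith⟩
      have hr : PySem.Int.mod (2^k*2^k*3 + hN k (2^k - 1 - (x - 2^k)) (2^k - 1 - y)) (2^k*2^k)
          = hN k (2^k - 1 - (x - 2^k)) (2^k - 1 - y) := by
        have h5 := PySem.Int.floordiv_mul_add_mod (2^k*2^k*3 + hN k (2^k - 1 - (x - 2^k)) (2^k - 1 - y)) (2^k*2^k)
        rw [hq] at h5; omega
      rw [hq, hr, ih f (by omega) (2^k - 1 - (x - 2^k)) (2^k - 1 - y) (by omega) (by omega) (by omega) (by omega)]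
      norm_num
      ring
    · -- q = 0
      have hb := hN_bound k x y (by omega) (by omega) (by omega) (by omega)
      rw [d2xyB]
      simp only [hn1, dif_neg, not_false_iff, fd_pow]
      have hq : PySem.Int.floordiv (hN k x y) (2^k*2^k) = 0 :=
        (PySem.Int.floordiv_eq_iff_of_pos hm).mpr ⟨by nlinarith, by nlinarith⟩
      have hr : PySem.Int.mod (hN k x y) (2^k*2^k) = hN k x y := by
        have h5 := PySem.Int.floordiv_mul_add_mod (hN k x y) (2^k*2^k)
        rw [hq] at h5; omega
      rw [hq, hr, ih f (by omega) x y (by omega) (by omega) (by omega) (by omega)]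
      norm_num

theorem emod_lower (a H : Int) (hH : 0 < H) (h : H ≤ a % (H*2)) : a % H = a % (H*2) - H := by
  have hd := Int.emod_def a (H*2)
  have hlt := Int.emod_lt_of_pos a (show (0:Int) < H*2 by omega)
  exact emod_eq_of a _ H hH (by omega) (by omega) ⟨2*(a/(H*2)) + 1, by rw [hd]; ring⟩

theorem emod_upper (a H : Int) (hH : 0 < H) (h : a % (H*2) < H) : a % H = a % (H*2) := by
  have hd := Int.emod_def a (H*2)
  have hge := Int.emod_nonneg a (show (H*2) ≠ 0 by omega)
  exact emod_eq_of a _ H hH (by omega) (by omega) ⟨2*(a/(H*2)), by rw [hd]; ring⟩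

theorem emod_compl_hi (n a H : Int) (hH : 0 < H) (hn : (H*2) ∣ n) (h : H ≤ a % (H*2)) :
    (n - 1 - a) % H = H*2 - 1 - a % (H*2) := by
  obtain ⟨c, hc⟩ := hn
  have hd := Int.emod_def a (H*2)
  have hlt := Int.emod_lt_of_pos a (show (0:Int) < H*2 by omega)
  exact emod_eq_of _ _ H hH (by omega) (by omega)
    ⟨2*c - 2 - 2*(a/(H*2)), by rw [hc, hd]; ring⟩

theorem emod_compl_lo (n a H : Int) (hH : 0 < H) (hn : (H*2) ∣ n) (h : a % (H*2) < H) :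
    (n - 1 - a) % H = H - 1 - a % (H*2) := by
  obtain ⟨c, hc⟩ := hn
  have hd := Int.emod_def a (H*2)
  have hge := Int.emod_nonneg a (show (H*2) ≠ 0 by omega)
  exact emod_eq_of _ _ H hH (by omega) (by omega)
    ⟨2*c - 1 - 2*(a/(H*2)), by rw [hc, hd]; ring⟩

theorem hilbLoop_zero_s (n : Int) (f : Nat) (x y d : Int) : hilbLoopA n f 0 x y d = d := by
  cases f <;> simp [hilbLoopA]

theorem hilbLoop_eq (j : Nat) : ∀ (fuel : Nat), j + 1 ≤ fuel → ∀ (n x y d : Int), ((2:Int) ^ (j+1)) ∣ n →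
    0 ≤ x → x < n → 0 ≤ y → y < n →
    hilbLoopA n fuel (2 ^ j) x y d = d + hN (j+1) (y % 2 ^ (j+1)) (x % 2 ^ (j+1)) := by
  induction j with
  | zero =>
    intro fuel hf n x y d hdvd hx0 hx1 hy0 hy1
    obtain ⟨f, rfl⟩ : ∃ f, fuel = f + 1 := ⟨fuel - 1, by omega⟩
    have hfd : PySem.Int.floordiv (1:Int) 2 = 0 := by
      rw [PySem.Int.floordiv_eq_ediv_of_pos (by norm_num)]; decide
    have hbx := band_pos_iff x 0 hx0
    have hby := band_pos_iff y 0 hy0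
    norm_num at hbx hby
    have hx2 := Int.emod_nonneg x (show (2:Int) ≠ 0 by norm_num)
    have hx3 := Int.emod_lt_of_pos x (show (0:Int) < 2 by norm_num)
    have hy2 := Int.emod_nonneg y (show (2:Int) ≠ 0 by norm_num)
    have hy3 := Int.emod_lt_of_pos y (show (0:Int) < 2 by norm_num)
    rw [hilbLoopA]
    norm_num [hfd]
    rw [hilbLoop_zero_s]
    norm_num [hN, hbx, hby]
    by_cases hcx : 1 ≤ x % 2 <;> by_cases hcy : 1 ≤ y % 2 <;>
      simp only [hcx, hcy, if_true, if_false] <;> norm_num <;> decide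
  | succ j ih =>
    intro fuel hf n x y d hdvd hx0 hx1 hy0 hy1
    obtain ⟨f, rfl⟩ : ∃ f, fuel = f + 1 := ⟨fuel - 1, by omega⟩
    have hpos : (0:Int) < 2 ^ (j+1) := by positivity
    have hM2 : ((2:Int) ^ (j+1+1)) = 2 ^ (j+1) * 2 := by rw [pow_succ]
    have hdvd' : ((2:Int) ^ (j+1)) ∣ n := dvd_trans ⟨2, hM2⟩ hdvd
    have hdvdM : ((2:Int) ^ (j+1) * 2) ∣ n := hM2 ▸ hdvd
    have hbx := band_pos_iff x (j+1) hx0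
    have hby := band_pos_iff y (j+1) hy0
    rw [hM2] at hbx hby
    rw [hilbLoopA, if_pos hpos, fd_pow, hM2]
    by_cases hcy : 2 ^ (j+1) ≤ y % (2 ^ (j+1) * 2) <;>
      by_cases hcx : 2 ^ (j+1) ≤ x % (2 ^ (j+1) * 2)
    · -- ry = 1, rx = 1
      simp only [hbx, hby, hcx, hcy, if_true, if_false]
      norm_num
      rw [show PySem.Int.bxor 3 1 = 2 from by decide]
      rw [ih f (by omega) n x y _ hdvd' hx0 hx1 hy0 hy1]
      simp only [hN]
      rw [if_pos hcy, if_pos hcx, emod_lower y _ hpos hcy, emod_lower x _ hpos hcx]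
      ring
    · -- ry = 1, rx = 0
      simp only [hbx, hby, hcx, hcy, if_true, if_false]
      norm_num
      rw [show PySem.Int.bxor 0 1 = 1 from by decide]
      rw [ih f (by omega) n x y _ hdvd' hx0 hx1 hy0 hy1]
      simp only [hN]
      rw [if_pos hcy, if_neg hcx, emod_lower y _ hpos hcy,
          emod_upper x _ hpos (by omega)]
      ring
    · -- ry = 0, rx = 1
      simp only [hbx, hby, hcx, hcy, if_true, if_false]
      norm_num
      rw [ih f (by omega) n (n - 1 - y) (n - 1 - x) _ hdvd' (by omega) (by omega) (by omega) (by omega)]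
      simp only [hN]
      rw [if_neg hcy, if_pos hcx]
      rw [show (2:Int) ^ (j+1) - 1 - (x % (2 ^ (j+1) * 2) - 2 ^ (j+1))
            = 2 ^ (j+1) * 2 - 1 - x % (2 ^ (j+1) * 2) from by ring]
      rw [emod_compl_hi n x _ hpos hdvdM hcx, emod_compl_lo n y _ hpos hdvdM (by omega)]
      ring
    · -- ry = 0, rx = 0
      simp only [hbx, hby, hcx, hcy, if_true, if_false]
      norm_num
      rw [ih f (by omega) n y x _ hdvd' hy0 hy1 hx0 hx1]
      simp only [hN]
      rw [if_neg hcy, if_neg hcx, emod_upper y _ hpos (by omega),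
          emod_upper x _ hpos (by omega)]

theorem index_eq (k : Nat) (y x : Int) (hy0 : 0 ≤ y) (hy : y < 2 ^ k) (hx0 : 0 ≤ x)
    (hx : x < 2 ^ k) : get_hilbert_index ((2:Int) ^ k) y x = hN k y x := by
  cases k with
  | zero =>
    rw [get_hilbert_index]
    norm_num at hy hx ⊢
    rw [hilbLoop_zero_s]
    norm_num [hN]
  | succ j =>
    have htn : ((2:Int) ^ (j+1)).toNat = 2 ^ (j+1) := by
      rw [two_pow_cast]; exact Int.toNat_natCast _
    rw [get_hilbert_index, fd_pow,
        hilbLoop_eq j (((2:Int) ^ (j+1)).toNat + 1)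
          (by rw [htn]; have := Nat.lt_two_pow_self (n := j+1); omega)
          ((2:Int) ^ (j+1)) x y 0 dvd_rfl hx0 hx hy0 hy,
        Int.emod_eq_of_lt hy0 hy, Int.emod_eq_of_lt hx0 hx]
    ring

def cellV (chunk : List Int) (k : Nat) (y x : Int) : Int :=
  (PySem.List.pyGet? chunk (hN k y x)).getD (-1)

theorem rowA_eq (k : Nat) (chunk : List Int) (y : Int) (hy0 : 0 ≤ y) (hy : y < 2 ^ k) :
    rowA ((2:Int) ^ k) chunk y = (List.range (2 ^ k)).map (fun xn : Nat => cellV chunk k y (xn : Int)) := by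
  rw [rowA, PySem.List.foldl_append_singleton_eq_map, PySem.List.pyRange_one, List.map_map]
  rw [List.nil_append, show ((2:Int) ^ k - 0).toNat = 2 ^ k from by
    rw [sub_zero, two_pow_cast, Int.toNat_natCast]]
  apply List.map_congr_left
  intro xn hxn
  rw [List.mem_range] at hxn
  simp only [Function.comp_apply, zero_add]
  rw [cellV, index_eq k y (xn : Int) hy0 hy (by positivity)
    (by rw [two_pow_cast]; exact_mod_cast hxn)]

def gcell (g : List (List Int)) (yn xn : Nat) : Int := (g.getD yn []).getD xn 0

def sstep (coords : List (Int × Int)) : List (List Int) → Int × Int → List (List Int) :=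
  fun g dv =>
    let xy := (PySem.List.pyGet? coords dv.1).getD (0, 0)
    g.set xy.2.toNat ((g.getD xy.2.toNat []).set xy.1.toNat dv.2)

theorem getD_set_self (l : List Int) (i : Nat) (a d : Int) (h : i < l.length) :
    (l.set i a).getD i d = a := by
  simp [List.getD_eq_getElem?_getD, h]

theorem getD_set_ne (l : List Int) (i j : Nat) (a d : Int) (h : i ≠ j) :
    (l.set i a).getD j d = l.getD j d := by
  simp [List.getD_eq_getElem?_getD, h]

theorem getDL_set_self (l : List (List Int)) (i : Nat) (a : List Int) (h : i < l.length) :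
    (l.set i a).getD i [] = a := by
  simp [List.getD_eq_getElem?_getD, h]

theorem getDL_set_ne (l : List (List Int)) (i j : Nat) (a : List Int) (h : i ≠ j) :
    (l.set i a).getD j [] = l.getD j [] := by
  simp [List.getD_eq_getElem?_getD, h]

theorem scatter_go (k : Nat) (fuel : Nat) (hfuel : k + 1 ≤ fuel) (coords : List (Int × Int))
    (hcget : ∀ dN : Nat, dN < 2 ^ k * 2 ^ k →
      PySem.List.pyGet? coords (dN : Int) = some (d2xyB fuel ((2:Int) ^ k) (dN : Int))) :
    ∀ (l : List Int) (sN : Nat) (g : List (List Int)),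
    sN + l.length ≤ 2 ^ k * 2 ^ k →
    g.length = 2 ^ k → (∀ yn, yn < 2 ^ k → (g.getD yn []).length = 2 ^ k) →
    ((PySem.List.enumerate l (sN : Int)).foldl (sstep coords) g).length = 2 ^ k
    ∧ (∀ yn, yn < 2 ^ k → (((PySem.List.enumerate l (sN : Int)).foldl (sstep coords) g).getD yn []).length = 2 ^ k)
    ∧ ∀ (yn xn : Nat), yn < 2 ^ k → xn < 2 ^ k →
        gcell ((PySem.List.enumerate l (sN : Int)).foldl (sstep coords) g) yn xn =
          if (sN : Int) ≤ hN k (yn : Int) (xn : Int) ∧ hN k (yn : Int) (xn : Int) < (sN : Int) + l.length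
          then l.getD ((hN k (yn : Int) (xn : Int)).toNat - sN) 0
          else gcell g yn xn := by
  intro l
  induction l with
  | nil =>
    intro sN g hle hglen hgrow
    simp only [PySem.List.enumerate_nil, List.foldl_nil, List.length_nil]
    refine ⟨hglen, hgrow, ?_⟩
    intro yn xn hyn hxn
    rw [if_neg (by push_cast; omega)]
  | cons a l' ih =>
    intro sN g hle hglen hgrow
    have h2k : ((2:Int) ^ k) = ((2 ^ k : Nat) : Int) := two_pow_cast k
    have hsNlt : sN < 2 ^ k * 2 ^ k := by simp at hle; omega
    have hsNlt' : (sN : Int) < 2 ^ k * 2 ^ k := by rw [h2k]; push_cast; exact_mod_cast hsNlt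
    -- the write of element a at curve position sN
    have hget := hcget sN hsNlt
    obtain ⟨hp10, hp11, hp20, hp21, hpval⟩ := d2xy_inv k fuel hfuel (sN : Int) (by positivity) hsNlt'
    set p := d2xyB fuel ((2:Int) ^ k) (sN : Int) with hp
    have hp2n : p.2.toNat < 2 ^ k := by rw [h2k] at hp21; omega
    have hp1n : p.1.toNat < 2 ^ k := by rw [h2k] at hp11; omega
    have hstep : sstep coords g ((sN : Int), a)
        = g.set p.2.toNat ((g.getD p.2.toNat []).set p.1.toNat a) := by
      rw [sstep]; simp only [hget, Option.getD_some]
    have hg1len : (g.set p.2.toNat ((g.getD p.2.toNat []).set p.1.toNat a)).length = 2 ^ k := by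
      rw [List.length_set, hglen]
    set g1 := g.set p.2.toNat ((g.getD p.2.toNat []).set p.1.toNat a) with hg1
    have hg1row : ∀ yn, yn < 2 ^ k → (g1.getD yn []).length = 2 ^ k := by
      intro yn hyn
      by_cases hcase : p.2.toNat = yn
      · rw [hg1, ← hcase, getDL_set_self _ _ _ (by omega), List.length_set]
        exact hgrow _ hp2n
      · rw [hg1, getDL_set_ne _ _ _ _ hcase]; exact hgrow _ hyn
    have hg1cell : ∀ yn xn, yn < 2 ^ k → xn < 2 ^ k →
        gcell g1 yn xn = if yn = p.2.toNat ∧ xn = p.1.toNat then a else gcell g yn xn := by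
      intro yn xn hyn hxn
      by_cases hy : yn = p.2.toNat
      · subst hy
        rw [gcell, hg1, getDL_set_self _ _ _ (by omega)]
        by_cases hx : xn = p.1.toNat
        · subst hx
          rw [getD_set_self _ _ _ _ (by rw [hgrow _ hp2n]; omega), if_pos ⟨rfl, rfl⟩]
        · rw [getD_set_ne _ _ _ _ _ (fun hh => hx hh.symm), if_neg (by tauto)]
          rfl
      · rw [gcell, hg1, getDL_set_ne _ _ _ _ (fun hh => hy hh.symm), if_neg (by tauto)]
        rfl
    -- apply the induction hypothesis after the write
    have hcast1 : ((sN : Int) + 1) = (((sN + 1 : Nat)) : Int) := by push_cast; ring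
    obtain ⟨ihlen, ihrow, ihcell⟩ := ih (sN + 1) g1 (by simp at hle ⊢; omega) hg1len hg1row
    rw [PySem.List.enumerate_cons, List.foldl_cons, hstep, hcast1]
    refine ⟨ihlen, ihrow, ?_⟩
    intro yn xn hyn hxn
    simp only [List.length_cons]
    rw [ihcell yn xn hyn hxn]
    have hyn' : ((yn : Int)) < 2 ^ k := by rw [h2k]; exact_mod_cast hyn
    have hxn' : ((xn : Int)) < 2 ^ k := by rw [h2k]; exact_mod_cast hxn
    have hb := hN_bound k (yn : Int) (xn : Int) (by positivity) hyn' (by positivity) hxn'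
    by_cases heq : hN k (yn : Int) (xn : Int) = (sN : Int)
    · -- this is exactly the cell written in this step
      have hinv := hN_inv k fuel hfuel (yn : Int) (xn : Int) (by positivity) hyn' (by positivity) hxn'
      rw [heq, ← hp] at hinv
      have hpx : p.1 = (xn : Int) := by rw [hinv]
      have hpy : p.2 = (yn : Int) := by rw [hinv]
      rw [if_neg (by push_cast; omega), hg1cell yn xn hyn hxn,
          if_pos ⟨by omega, by omega⟩, if_pos (by push_cast; omega)]
      have : (hN k (yn : Int) (xn : Int)).toNat - sN = 0 := by omega
      rw [this, List.getD_cons_zero]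
    · by_cases hin : ((sN : Int)) + 1 ≤ hN k (yn : Int) (xn : Int)
        ∧ hN k (yn : Int) (xn : Int) < ((sN : Int)) + 1 + l'.length
      · rw [if_pos (by push_cast at hin ⊢; omega), if_pos (by push_cast at hin ⊢; omega)]
        have hsplit : (hN k (yn : Int) (xn : Int)).toNat - sN
            = ((hN k (yn : Int) (xn : Int)).toNat - (sN + 1)) + 1 := by omega
        rw [hsplit, List.getD_cons_succ]
      · rw [if_neg (by push_cast at hin ⊢; omega), hg1cell yn xn hyn hxn,
            if_neg ?_, if_neg (by push_cast at hin ⊢; omega)]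
        rintro ⟨h1, h2⟩
        apply heq
        rw [← hpval]
        congr 1 <;> omega

theorem emit_eq (width : Int) (chunk : List Int) :
    ∀ (rows : List (List Int)) (ys : List Int) (hl : rows.length = ys.length),
    (∀ (i : Nat) (h : i < ys.length), rows[i]'(hl ▸ h) = rowA width chunk (ys[i]'h)) →
    emitB rows = rowsA width chunk ys := by
  intro rows
  induction rows with
  | nil =>
    intro ys hl _
    have : ys = [] := List.length_eq_zero_iff.mp (by simpa using hl.symm)
    subst this; rfl
  | cons r rs ih =>
    intro ys hl hrow
    cases ys with
    | nil => simp at hl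
    | cons y ys' =>
      have hr := hrow 0 (by simp)
      simp only [List.getElem_cons_zero] at hr
      rw [emitB, rowsA, hr]
      by_cases hbr : (PySem.List.pyGet? (rowA width chunk y) 0).getD 0 < 0
      · rw [if_pos hbr, if_pos hbr]
      · rw [if_neg hbr, if_neg hbr, ih ys' (by simpa using hl)]
        intro i hi
        have := hrow (i+1) (by simpa using hi)
        simpa using this

theorem grid0_spec (k : Nat) :
    ((PySem.List.pyRange 0 ((2:Int) ^ k) 1).map
      (fun _ => List.replicate ((2:Int) ^ k).toNat (-1 : Int))).length = 2 ^ k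
    ∧ (∀ yn, yn < 2 ^ k →
        (((PySem.List.pyRange 0 ((2:Int) ^ k) 1).map
          (fun _ => List.replicate ((2:Int) ^ k).toNat (-1 : Int))).getD yn []).length = 2 ^ k)
    ∧ ∀ yn xn : Nat, yn < 2 ^ k → xn < 2 ^ k →
        gcell ((PySem.List.pyRange 0 ((2:Int) ^ k) 1).map
          (fun _ => List.replicate ((2:Int) ^ k).toNat (-1 : Int))) yn xn = -1 := by
  have htn : ((2:Int) ^ k).toNat = 2 ^ k := by rw [two_pow_cast]; exact Int.toNat_natCast _
  have hlen : ((PySem.List.pyRange 0 ((2:Int) ^ k) 1).map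
      (fun _ => List.replicate ((2:Int) ^ k).toNat (-1 : Int))).length = 2 ^ k := by
    rw [List.length_map, PySem.List.length_pyRange_one, sub_zero, htn]
  have hrow : ∀ yn, yn < 2 ^ k →
      ((PySem.List.pyRange 0 ((2:Int) ^ k) 1).map
        (fun _ => List.replicate ((2:Int) ^ k).toNat (-1 : Int))).getD yn []
      = List.replicate (2 ^ k) (-1 : Int) := by
    intro yn hyn
    rw [List.getD_eq_getElem?_getD, List.getElem?_map]
    rw [List.getElem?_eq_getElem (by rw [PySem.List.length_pyRange_one, sub_zero, htn]; exact hyn)]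
    simp [htn]
  refine ⟨hlen, ?_, ?_⟩
  · intro yn hyn; rw [hrow yn hyn, List.length_replicate]
  · intro yn xn hyn hxn
    rw [gcell, hrow yn hyn, List.getD_eq_getElem?_getD,
        List.getElem?_eq_getElem (by rw [List.length_replicate]; exact hxn)]
    simp

theorem cell_value (chunk : List Int) (k : Nat) (h : Int) (h0 : 0 ≤ h) :
    (if (0:Int) ≤ h ∧ h < (0:Int) + chunk.length then chunk.getD h.toNat 0 else -1)
    = (PySem.List.pyGet? chunk h).getD (-1) := by
  rw [PySem.List.pyGet?_of_nonneg _ h0]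
  by_cases hlt : h.toNat < chunk.length
  · rw [if_pos ⟨h0, by omega⟩, List.getElem?_eq_getElem hlt]
    simp [List.getD_eq_getElem?_getD, List.getElem?_eq_getElem hlt]
  · rw [if_neg (by omega), List.getElem?_eq_none (by omega)]
    rfl

theorem chunk_eq (k : Nat) (fuel : Nat) (hfuel : k + 1 ≤ fuel) (coords : List (Int × Int))
    (hc : coords = (PySem.List.pyRange 0 ((2:Int) ^ k * 2 ^ k) 1).map (fun d => d2xyB fuel ((2:Int) ^ k) d))
    (chunk : List Int) (hlen : chunk.length ≤ 2 ^ k * 2 ^ k) :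
    emitB (scatterB coords chunk
      ((PySem.List.pyRange 0 ((2:Int) ^ k) 1).map (fun _ => List.replicate ((2:Int) ^ k).toNat (-1))))
    = rowsA ((2:Int) ^ k) chunk (PySem.List.pyRange 0 ((2:Int) ^ k) 1) := by
  have htn : ((2:Int) ^ k).toNat = 2 ^ k := by rw [two_pow_cast]; exact Int.toNat_natCast _
  have hcget : ∀ dN : Nat, dN < 2 ^ k * 2 ^ k →
      PySem.List.pyGet? coords (dN : Int) = some (d2xyB fuel ((2:Int) ^ k) (dN : Int)) := by
    intro dN hdN
    rw [hc, PySem.List.pyGet?_natCast,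
        show ((2:Int) ^ k * 2 ^ k) = ((2 ^ k * 2 ^ k : Nat) : Int) from by push_cast; ring]
    exact PySem.List.getElem?_map_pyRange_zero _ _ _ hdN
  obtain ⟨g0len, g0row, g0cell⟩ := grid0_spec k
  have hsc : scatterB coords chunk
      ((PySem.List.pyRange 0 ((2:Int) ^ k) 1).map (fun _ => List.replicate ((2:Int) ^ k).toNat (-1)))
      = (PySem.List.enumerate chunk ((0 : Nat) : Int)).foldl (sstep coords)
        ((PySem.List.pyRange 0 ((2:Int) ^ k) 1).map (fun _ => List.replicate ((2:Int) ^ k).toNat (-1))) := rfl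
  obtain ⟨flen, frow, fcell⟩ :=
    scatter_go k fuel hfuel coords hcget chunk 0 _ (by omega) g0len g0row
  rw [hsc]
  apply emit_eq ((2:Int) ^ k) chunk _ _
    (by rw [flen, PySem.List.length_pyRange_one, sub_zero, htn])
  intro i hi
  have hi' : i < 2 ^ k := by
    rw [PySem.List.length_pyRange_one, sub_zero, htn] at hi; exact hi
  have hiI : ((i : Int)) < 2 ^ k := by rw [two_pow_cast]; exact_mod_cast hi'
  rw [PySem.List.getElem_pyRange_one _ _ _ hi, zero_add,
      rowA_eq k chunk (i : Int) (by positivity) hiI]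
  rw [show (List.foldl (sstep coords) ((PySem.List.pyRange 0 ((2:Int) ^ k) 1).map
        (fun _ => List.replicate ((2:Int) ^ k).toNat (-1)))
        (PySem.List.enumerate chunk ((0 : Nat) : Int)))[i]'(by rw [flen]; exact hi')
      = (List.foldl (sstep coords) ((PySem.List.pyRange 0 ((2:Int) ^ k) 1).map
        (fun _ => List.replicate ((2:Int) ^ k).toNat (-1)))
        (PySem.List.enumerate chunk ((0 : Nat) : Int))).getD i [] from
    (List.getD_eq_getElem _ _ (by rw [flen]; exact hi')).symm]
  apply List.ext_getElem
  · rw [frow i hi', List.length_map, List.length_range]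
  · intro xn h1 h2
    have hxn : xn < 2 ^ k := by rwa [frow i hi'] at h1
    rw [List.getElem_map, List.getElem_range,
        show ∀ (l : List Int) (hh : xn < l.length), l[xn]'hh = l.getD xn 0 from
          fun l hh => (List.getD_eq_getElem l 0 hh).symm]
    have hfc := fcell i xn hi' hxn
    rw [gcell] at hfc
    rw [hfc, g0cell i xn hi' hxn]
    have hb := hN_bound k (i : Int) (xn : Int) (by positivity) hiI (by positivity)
      (by rw [two_pow_cast]; exact_mod_cast hxn)
    rw [show ((0:Nat):Int) = 0 from rfl]
    exact cell_value chunk k _ hb.1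

theorem outer_eq (k : Nat) (dfuel : Nat) (hdfuel : k + 1 ≤ dfuel) (_list : List Int)
    (coords : List (Int × Int))
    (hc : coords = (PySem.List.pyRange 0 ((2:Int) ^ k * 2 ^ k) 1).map (fun d => d2xyB dfuel ((2:Int) ^ k) d)) :
    ∀ (fuel : Nat) (nA nB : Int) (eA : nA = (2:Int) ^ k * 2 ^ k) (eB : nB = (2:Int) ^ k * 2 ^ k)
      (i : Int), 0 ≤ i →
    outerA _list ((2:Int) ^ k) nA fuel i = outerB _list ((2:Int) ^ k) nB coords fuel i := by
  intro fuel
  induction fuel with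
  | zero => intro nA nB eA eB i hi; rfl
  | succ f ihf =>
    intro nA nB eA eB i hi
    subst eA; subst eB
    rw [outerA, outerB]
    by_cases hcond : i * ((2:Int) ^ k * 2 ^ k) ≤ (_list.length : Int)
    · rw [if_pos hcond, if_pos hcond]
      have hstep : (i + 1) * ((2:Int) ^ k * 2 ^ k) = i * ((2:Int) ^ k * 2 ^ k) + (2:Int) ^ k * 2 ^ k := by
        ring
      have hchunklen : (PySem.List.slice _list (some (i * ((2:Int) ^ k * 2 ^ k)))
          (some ((i + 1) * ((2:Int) ^ k * 2 ^ k)))).length ≤ 2 ^ k * 2 ^ k := by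
        rw [PySem.List.slice_toNat _ (by positivity) (by nlinarith)]
        refine le_trans (List.length_take_le _ _) ?_
        have htn2 : (((2:Int) ^ k * 2 ^ k)).toNat = 2 ^ k * 2 ^ k := by
          rw [show ((2:Int) ^ k * 2 ^ k) = ((2 ^ k * 2 ^ k : Nat) : Int) from by push_cast; ring]
          exact Int.toNat_natCast _
        omega
      simp only []
      congr 1
      · exact (chunk_eq k dfuel hdfuel coords hc _ hchunklen).symm
      · exact ihf _ _ rfl rfl (i + 1) (by omega)
    · rw [if_neg hcond, if_neg hcond]

theorem fitLoop_pow (length width : Int) : ∀ (fuel : Nat) (w : Int), (∃ k : Nat, w = 2 ^ k) →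
    ∃ k : Nat, fitLoop length width fuel w = 2 ^ k := by
  intro fuel
  induction fuel with
  | zero => intro w hp; exact hp
  | succ f ih =>
    intro w hp
    rw [fitLoop]
    split_ifs with h
    · exact ih (w * 2) ⟨hp.choose + 1, by rw [pow_succ, ← hp.choose_spec]⟩
    · exact hp

theorem fit_pow (length width : Int) : ∃ k : Nat, get_fit_terminal_square length width = 2 ^ k :=
  fitLoop_pow length width (length.toNat + 1) 1 ⟨0, by norm_num⟩

theorem main_eq (_list : List Int) (width : Int) :
    get_hilbert_curve _list width = get_hilbert_curve_alt _list width := by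
  obtain ⟨k, hk⟩ := fit_pow ((_list.length : Int)) width
  have h1 : ∀ (w : Int) (e : w = 2 ^ k),
      outerA _list w (w ^ 2) (_list.length + 2) 0
        = outerB _list w (w * w)
            ((PySem.List.pyRange 0 (w * w) 1).map (fun d => d2xyB (w.toNat + 1) w d))
            (_list.length + 2) 0 := by
    intro w e
    subst e
    have htn : ((2:Int) ^ k).toNat = 2 ^ k := by
      rw [two_pow_cast]; exact Int.toNat_natCast _
    exact outer_eq k (((2:Int) ^ k).toNat + 1)
      (by rw [htn]; have := Nat.lt_two_pow_self (n := k); omega) _list _ rfl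
      (_list.length + 2) _ _ (by ring) rfl 0 le_rfl
  simp only [get_hilbert_curve, get_hilbert_curve_alt]
  exact h1 _ hk

-- ===== VERDICT (by name: the statement is the Claim_ definition above) =====
theorem get_hilbert_curve_spec : Claim_equal_get_hilbert_curve := by
  intro _list width _
  unfold Spec_get_hilbert_curve
  exact main_eq _list width
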